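-- pv_equiv track=rewrite | github.com/christophera1/lando-ai | app.py | pick_ldc_anchor_from_finder_pages
-- ===== SOURCE A (Python) =====
-- from typing import List, Dict, Any, Tuple, Optional
--
-- def _is_ldc_finder_entry(entry: Dict[str, Any]) -> bool:
--     dn = (entry.get("doc_name") or "").lower()
--     fp = (entry.get("file_path") or "").lower().replace("\\", "/")
--     return "ldc" in dn or "ldc_" in fp or "/ldc" in fp
--
-- def pick_ldc_anchor_from_finder_pages(
--     finder_pages: List[Dict[str, Any]],
-- ) -> Optional[Dict[str, Any]]:
--     """Pick best LDC row to anchor the ±page browser (prefer chart-transcribed snippet)."""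
--     ldc_hits = [p for p in finder_pages if _is_ldc_finder_entry(p)]
--     if not ldc_hits:
--         return None
--     chart_mark = "[chart/figure transcription from page render"
--     for p in ldc_hits:
--         sn = (p.get("snippet") or "").lower()
--         if chart_mark in sn:
--             return p
--     return ldc_hits[0]
-- ===== SOURCE B (Python) =====
-- from typing import List, Dict, Any, Optional
--
-- def _is_ldc_finder_entry(entry: Dict[str, Any]) -> bool:
--     dn = (entry.get("doc_name") or "").lower()
--     fp = (entry.get("file_path") or "").lower().replace("\\", "/")
--     return "ldc" in dn or "ldc_" in fp or "/ldc" in fp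
--
-- def pick_ldc_anchor_from_finder_pages(
--     finder_pages: List[Dict[str, Any]],
-- ) -> Optional[Dict[str, Any]]:
--     """Single pass: return first chart-marked LDC entry, else first LDC entry, else None."""
--     chart_mark = "[chart/figure transcription from page render"
--     first_hit = None
--     for p in finder_pages:
--         if not _is_ldc_finder_entry(p):
--             continue
--         if chart_mark in (p.get("snippet") or "").lower():
--             return p
--         if first_hit is None:
--             first_hit = p
--     return first_hit
-- ===== Notes on version B (the rewrite author's own statement) =====
-- stated objective: simpler
-- what changed: Replaced the two-pass structure (filter into an intermediate ldc_hits list, then scan it) with one pass over finder_pages keeping a first_hit accumulator, returning immediately on the first chart-marked LDC entry.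
import Mathlib
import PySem

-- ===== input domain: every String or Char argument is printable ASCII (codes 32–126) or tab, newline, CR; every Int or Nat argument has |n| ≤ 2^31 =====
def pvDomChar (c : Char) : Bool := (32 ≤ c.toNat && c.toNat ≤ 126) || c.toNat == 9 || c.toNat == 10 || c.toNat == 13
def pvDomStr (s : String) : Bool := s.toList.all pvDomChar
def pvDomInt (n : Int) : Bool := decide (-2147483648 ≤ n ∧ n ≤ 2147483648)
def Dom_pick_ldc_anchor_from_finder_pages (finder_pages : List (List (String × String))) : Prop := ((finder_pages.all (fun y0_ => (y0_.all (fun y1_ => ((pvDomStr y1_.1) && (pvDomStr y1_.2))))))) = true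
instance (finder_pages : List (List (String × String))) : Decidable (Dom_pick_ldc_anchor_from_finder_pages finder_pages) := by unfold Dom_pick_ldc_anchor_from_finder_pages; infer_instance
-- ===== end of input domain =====

-- B fuses A's filter-then-scan into one pass with a first_hit accumulator (objective: simpler); same return value.
-- ===== PORT A =====
-- shared helper: _is_ldc_finder_entry (used literally by both Pythons)
def pvGetStr (e : List (String × String)) (k : String) : String :=
  ((PySem.Dict.mk e).get? k).getD ""   -- (entry.get(k) or "") on string values

def pvIsLdcFinderEntry (e : List (String × String)) : Bool :=
  let dn := PySem.Str.lower (pvGetStr e "doc_name")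
  let fp := PySem.Str.replace (PySem.Str.lower (pvGetStr e "file_path")) "\\" "/"
  PySem.Str.isIn "ldc" dn || PySem.Str.isIn "ldc_" fp || PySem.Str.isIn "/ldc" fp

def pvChartMark : String := "[chart/figure transcription from page render"

def pvChartHit (p : List (String × String)) : Bool :=
  PySem.Str.isIn pvChartMark (PySem.Str.lower (pvGetStr p "snippet"))

-- A's second pass: the 'for p in ldc_hits' loop with its early return
def pvScanChart : List (List (String × String)) → Option (List (String × String))
  | [] => none
  | p :: rest => if pvChartHit p then some p else pvScanChart rest

def pick_ldc_anchor_from_finder_pages (finder_pages : List (List (String × String))) : Option (List (String × String)) :=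
  let ldc_hits := finder_pages.filter pvIsLdcFinderEntry
  match ldc_hits with
  | [] => none
  | h :: t =>
    match pvScanChart (h :: t) with
    | some p => some p
    | none => some h   -- return ldc_hits[0]

-- ===== PORT B =====
-- B's single loop over finder_pages, carrying first_hit
def pvLoopB : Option (List (String × String)) → List (List (String × String)) → Option (List (String × String))
  | first_hit, [] => first_hit
  | first_hit, p :: rest =>
    if !pvIsLdcFinderEntry p then pvLoopB first_hit rest
    else if pvChartHit p then some p
    else pvLoopB (if first_hit.isNone then some p else first_hit) rest

def pick_ldc_anchor_from_finder_pages_alt (finder_pages : List (List (String × String))) : Option (List (String × String)) :=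
  pvLoopB none finder_pages

-- ===== PRECONDITION & SPEC =====
def Spec_pick_ldc_anchor_from_finder_pages (finder_pages : List (List (String × String))) (out : Option (List (String × String))) : Prop := out = pick_ldc_anchor_from_finder_pages_alt finder_pages
instance (finder_pages : List (List (String × String))) (out : Option (List (String × String))) : Decidable (Spec_pick_ldc_anchor_from_finder_pages finder_pages out) := by unfold Spec_pick_ldc_anchor_from_finder_pages; infer_instance

-- ===== CLAIM (what is proved, stated in full; the proofs are below) =====
def Claim_equal_pick_ldc_anchor_from_finder_pages : Prop := ∀ (finder_pages : List (List (String × String))), Dom_pick_ldc_anchor_from_finder_pages finder_pages → Spec_pick_ldc_anchor_from_finder_pages finder_pages (pick_ldc_anchor_from_finder_pages finder_pages)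

-- ===== LEMMAS AND PROOFS =====

-- ===== VERDICT (by name: the statement is the Claim_ definition above) =====
theorem pvLoopB_eq (xs : List (List (String × String))) :
    ∀ first_hit, pvLoopB first_hit xs =
      match pvScanChart (xs.filter pvIsLdcFinderEntry) with
      | some p => some p
      | none =>
        match first_hit with
        | some h => some h
        | none => (xs.filter pvIsLdcFinderEntry).head? := by
  induction xs with
  | nil => intro first_hit; cases first_hit <;> simp [pvLoopB, pvScanChart]
  | cons p rest ih =>
    intro first_hit
    by_cases hl : pvIsLdcFinderEntry p
    · by_cases hc : pvChartHit p
      · cases first_hit <;> simp [pvLoopB, pvScanChart, hl, hc]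
      · cases first_hit <;> simp [pvLoopB, pvScanChart, hl, hc, ih]
    · cases first_hit <;> simp [pvLoopB, hl, ih]

theorem pick_ldc_anchor_from_finder_pages_spec : Claim_equal_pick_ldc_anchor_from_finder_pages := by
  intro finder_pages _
  unfold Spec_pick_ldc_anchor_from_finder_pages
  unfold pick_ldc_anchor_from_finder_pages pick_ldc_anchor_from_finder_pages_alt
  rw [pvLoopB_eq]
  cases h : finder_pages.filter pvIsLdcFinderEntry with
  | nil => simp [pvScanChart]
  | cons hd tl => cases hs : pvScanChart (hd :: tl) <;> simp [hs]
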